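-- pv_equiv track=rewrite | github.com/venkssa/finding-hidden-msg | python/part1/ch1/part1.py | _genome_to_numeric_genome_convertor
-- ===== SOURCE A (Python) =====
-- _nbase = {'A': 0, 'C': 1, 'G': 2, 'T': 3}
--
-- def _genome_to_numeric_genome_convertor(genome, k):
--     numeric_genome = []
--     value = 0
--     for ch in genome[0:k]:
--         value = value * 4 + _nbase[ch]
--     numeric_genome.append(value)
--
--     p = 4 ** (k - 1)
--     for prev, next in zip(genome[0:len(genome) - k], genome[k:]):
--         value -= (p * _nbase[prev])
--         value = value * 4 + _nbase[next]
--         numeric_genome.append(value)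
--
--     return numeric_genome
-- ===== SOURCE B (Python) =====
-- _nbase = {'A': 0, 'C': 1, 'G': 2, 'T': 3}
--
-- def _genome_to_numeric_genome_convertor(genome, k):
--     numeric_genome = []
--     for i in range(max(len(genome) - k + 1, 1)):
--         value = 0
--         for ch in genome[i:i + k]:
--             value = value * 4 + _nbase[ch]
--         numeric_genome.append(value)
--     return numeric_genome
-- ===== Notes on version B (the rewrite author's own statement) =====
-- stated objective: simpler
-- what changed: Drops the rolling-hash update (initial window plus a zip of outgoing/incoming characters with value -= p*prev; value = value*4 + next) and instead recomputes each window's base-4 value from scratch by iterating over the starting indices.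
-- outside the precondition, e.g. on _genome_to_numeric_genome_convertor('AC', -2): A returns [0, 0.0, 0.9375], B returns [0, 0, 0, 0, 0]; on _genome_to_numeric_genome_convertor('A', 0): A returns [0, 0.0], B returns [0, 0]; on _genome_to_numeric_genome_convertor('', 0): A returns [0], B returns [0]
import Mathlib
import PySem

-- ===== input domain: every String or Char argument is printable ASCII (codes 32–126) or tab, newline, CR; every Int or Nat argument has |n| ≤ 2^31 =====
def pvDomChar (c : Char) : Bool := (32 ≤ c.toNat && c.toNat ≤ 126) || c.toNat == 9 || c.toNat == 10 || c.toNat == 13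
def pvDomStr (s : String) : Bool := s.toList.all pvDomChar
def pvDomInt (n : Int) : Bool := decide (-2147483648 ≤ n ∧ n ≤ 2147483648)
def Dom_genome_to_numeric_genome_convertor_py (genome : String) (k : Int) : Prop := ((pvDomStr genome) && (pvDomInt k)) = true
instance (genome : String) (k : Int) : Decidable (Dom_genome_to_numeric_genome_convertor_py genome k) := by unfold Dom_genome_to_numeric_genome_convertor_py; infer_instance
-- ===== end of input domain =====

-- B recomputes every k-mer window's base-4 value from scratch instead of A's rolling update (return value only; no mutation).


-- ===== PORT A =====
-- _nbase = {'A': 0, 'C': 1, 'G': 2, 'T': 3}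
def pvNbase : PySem.Dict Char Int := PySem.Dict.ofList [('A', 0), ('C', 1), ('G', 2), ('T', 3)]
-- _nbase[ch]: Python raises KeyError on other characters; Pre_ excludes those, so the getD default is never read.
def pvNb (c : Char) : Int := pvNbase.getD c 0

def genome_to_numeric_genome_convertor_py (genome : String) (k : Int) : List Int :=
  let g := genome.toList
  let value := (PySem.List.slice g (some 0) (some k)).foldl (fun v ch => v * 4 + pvNb ch) 0
  let numeric := ([] : List Int) ++ [value]
  -- p = 4 ** (k - 1): an int exactly when k ≥ 1 (Pre_); for k ≤ 0 Python yields a float here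
  let p : Int := 4 ^ (k - 1).toNat
  let st := (List.zip (PySem.List.slice g (some 0) (some ((g.length : Int) - k)))
                      (PySem.List.slice g (some k) none)).foldl
      (fun (st : Int × List Int) pr =>
        let v := (st.1 - p * pvNb pr.1) * 4 + pvNb pr.2
        (v, st.2 ++ [v])) (value, numeric)
  st.2

-- ===== PORT B =====
def genome_to_numeric_genome_convertor_py_alt (genome : String) (k : Int) : List Int :=
  let g := genome.toList
  (PySem.List.pyRange 0 (max ((g.length : Int) - k + 1) 1) 1).foldl
    (fun acc i =>
      acc ++ [(PySem.List.slice g (some i) (some (i + k))).foldl (fun v ch => v * 4 + pvNb ch) 0])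
    ([] : List Int)

-- ===== PRECONDITION & SPEC =====
-- Pre_ excludes genomes with non-ACGT characters (A raises KeyError) and k ≤ 0, on which A's
-- p = 4**(k-1) is a fractional float so A returns floats, not ints (except an accidental [0]
-- on genomes too short for the second loop to run).
def Pre_genome_to_numeric_genome_convertor_py (genome : String) (k : Int) : Prop :=
  1 ≤ k ∧ (genome.toList.all fun c => c == 'A' || c == 'C' || c == 'G' || c == 'T') = true
instance (genome : String) (k : Int) : Decidable (Pre_genome_to_numeric_genome_convertor_py genome k) := by unfold Pre_genome_to_numeric_genome_convertor_py; infer_instance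
def pvWitness_genome_to_numeric_genome_convertor_py : String × Int := ("ACGT", 2)

def Spec_genome_to_numeric_genome_convertor_py (genome : String) (k : Int) (out : List Int) : Prop := out = genome_to_numeric_genome_convertor_py_alt genome k
instance (genome : String) (k : Int) (out : List Int) : Decidable (Spec_genome_to_numeric_genome_convertor_py genome k out) := by unfold Spec_genome_to_numeric_genome_convertor_py; infer_instance

-- ===== CLAIM (what is proved, stated in full; the proofs are below) =====
def Claim_equal_genome_to_numeric_genome_convertor_py : Prop := ∀ (genome : String) (k : Int), Dom_genome_to_numeric_genome_convertor_py genome k → Pre_genome_to_numeric_genome_convertor_py genome k → Spec_genome_to_numeric_genome_convertor_py genome k (genome_to_numeric_genome_convertor_py genome k)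

-- ===== LEMMAS AND PROOFS =====

-- base-4 value of a window, as both ports compute it
def pvEnc (l : List Char) : Int := l.foldl (fun v c => v * 4 + pvNb c) 0

lemma pvEnc_from (l : List Char) : ∀ a : Int,
    l.foldl (fun v c => v * 4 + pvNb c) a = a * 4 ^ l.length + pvEnc l := by
  induction l with
  | nil => intro a; simp [pvEnc]
  | cons c t ih =>
      intro a
      simp only [List.foldl_cons, List.length_cons, pvEnc] at *
      rw [ih (a * 4 + pvNb c), ih (0 * 4 + pvNb c)]
      ring

lemma pvEnc_snoc (l : List Char) (c : Char) : pvEnc (l ++ [c]) = pvEnc l * 4 + pvNb c := by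
  simp [pvEnc, List.foldl_append]

-- A's rolling loop, characterised: starting from the first window's value it appends every window's value.
lemma pvLoop (K : Nat) (hK : 1 ≤ K) :
    ∀ (s : List Char) (acc : List Int),
    ((List.zip (s.take (s.length - K)) (s.drop K)).foldl
      (fun (st : Int × List Int) pr =>
        let v := (st.1 - (4 : Int) ^ (K - 1) * pvNb pr.1) * 4 + pvNb pr.2
        (v, st.2 ++ [v]))
      (pvEnc (s.take K), acc ++ [pvEnc (s.take K)])).2
    = acc ++ (List.range (s.length - K + 1)).map (fun i => pvEnc ((s.drop i).take K)) := by
  obtain ⟨K', rfl⟩ : ∃ K', K = K' + 1 := ⟨K - 1, by omega⟩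
  simp only [Nat.add_sub_cancel]
  intro s
  induction s with
  | nil => intro acc; simp
  | cons c t ih =>
      intro acc
      simp only [List.length_cons]
      by_cases hlen : t.length < K' + 1
      · have h1 : t.length + 1 - (K' + 1) = 0 := by omega
        simp [h1]
      · rw [Nat.not_lt] at hlen
        have hK1 : K' < t.length := by omega
        have htake : (c :: t).take (t.length + 1 - (K' + 1)) = c :: t.take (t.length - (K' + 1)) := by
          rw [show t.length + 1 - (K' + 1) = (t.length - (K' + 1)) + 1 from by omega,
            List.take_succ_cons]
        have hdrop : (c :: t).drop (K' + 1) = t[K'] :: t.drop (K' + 1) := by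
          rw [List.drop_succ_cons, List.drop_eq_getElem_cons hK1]
        -- the rolling update sends window 0's value of (c :: t) to window 0's value of t
        have hstep : (pvEnc ((c :: t).take (K' + 1)) - (4 : Int) ^ K' * pvNb c) * 4 + pvNb t[K']
            = pvEnc (t.take (K' + 1)) := by
          have htk : t.take (K' + 1) = t.take K' ++ [t[K']] := by
            rw [List.take_add_one, List.getElem?_eq_getElem hK1]; rfl
          have hlength : (t.take K').length = K' := by simp; omega
          rw [List.take_succ_cons, htk, pvEnc_snoc]
          show (List.foldl _ 0 (c :: t.take K') - _) * 4 + _ = _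
          rw [List.foldl_cons, pvEnc_from, hlength]
          ring
        have hR : (List.range (t.length + 1 - (K' + 1) + 1)).map
              (fun i => pvEnc (((c :: t).drop i).take (K' + 1)))
            = pvEnc ((c :: t).take (K' + 1)) ::
              (List.range (t.length - (K' + 1) + 1)).map (fun i => pvEnc ((t.drop i).take (K' + 1))) := by
          rw [show t.length + 1 - (K' + 1) + 1 = (t.length - (K' + 1) + 1) + 1 from by omega,
            List.range_succ_eq_map]
          simp [List.map_map, Function.comp_def]
        rw [htake, hdrop, List.zip_cons_cons, List.foldl_cons, hR]
        simp only [hstep]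
        rw [ih (acc ++ [pvEnc ((c :: t).take (K' + 1))])]
        simp

theorem genome_to_numeric_genome_convertor_py_spec : Claim_equal_genome_to_numeric_genome_convertor_py := by
  intro genome k _ hpre
  obtain ⟨hk, -⟩ := hpre
  obtain ⟨K, rfl⟩ : ∃ K : Nat, k = (K : Int) := ⟨k.toNat, (Int.toNat_of_nonneg (by omega)).symm⟩
  have hK : 1 ≤ K := by exact_mod_cast hk
  show _ = _
  set g := genome.toList with hg
  -- B = the list of all window values
  have hB : genome_to_numeric_genome_convertor_py_alt genome (K : Int)
      = (List.range (g.length - K + 1)).map (fun j => pvEnc ((g.drop j).take K)) := by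
    simp only [genome_to_numeric_genome_convertor_py_alt, ← hg]
    have hM : max ((g.length : Int) - (K : Int) + 1) 1 = ((g.length - K + 1 : Nat) : Int) := by omega
    rw [hM, PySem.List.foldl_append_singleton_eq_map, PySem.List.pyRange_zero_nat, List.map_map]
    simp only [List.nil_append]
    apply List.map_congr_left
    intro j _
    simp only [Function.comp_apply, PySem.List.slice_natCast_add, pvEnc]
  -- A = the same list, via the rolling-loop characterisation
  have hA : genome_to_numeric_genome_convertor_py genome (K : Int)
      = (List.range (g.length - K + 1)).map (fun j => pvEnc ((g.drop j).take K)) := by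
    simp only [genome_to_numeric_genome_convertor_py, ← hg]
    have h0 : PySem.List.slice g (some 0) (some (K : Int)) = g.take K := by
      rw [PySem.List.slice_zero_start, PySem.List.slice_to_natCast]
    have hp : ((K : Int) - 1).toNat = K - 1 := by omega
    have hfrom : PySem.List.slice g (some (K : Int)) none = g.drop K :=
      PySem.List.slice_from_natCast g K
    have hzip : List.zip (PySem.List.slice g (some 0) (some ((g.length : Int) - (K : Int))))
          (g.drop K) = List.zip (g.take (g.length - K)) (g.drop K) := by
      by_cases hle : K ≤ g.length
      · have : (g.length : Int) - (K : Int) = ((g.length - K : Nat) : Int) := by omega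
        rw [PySem.List.slice_zero_start, this, PySem.List.slice_to_natCast]
      · have hnil : g.drop K = [] := List.drop_eq_nil_of_le (by omega)
        rw [hnil, List.zip_nil_right, List.zip_nil_right]
    simp only [h0, hp, hfrom, hzip]
    exact pvLoop K hK g []
  rw [hA, hB]
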